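-- pv_equiv track=rewrite | github.com/sanogueralorenzo/sanogueralorenzo.github.io | voice/scripts/prompt_eval_runner.py | extract_main_output_text
-- ===== SOURCE A (Python) =====
-- def extract_main_output_text(raw_output: str) -> str:
--     pre_benchmark = raw_output.split('BenchmarkInfo:', 1)[0]
--     lines = [line.rstrip() for line in pre_benchmark.splitlines()]
--
--     response_lines: list[str] = []
--     saw_input_prompt = False
--     for line in lines:
--         stripped = line.strip()
--         if stripped.startswith('input_prompt:'):
--             saw_input_prompt = True
--             continue
--         if not saw_input_prompt:
--             continue
--         if stripped.startswith('INFO:') or stripped.startswith('WARNING:'):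
--             continue
--         response_lines.append(line)
--
--     if not response_lines:
--         filtered = [
--             line for line in lines
--             if line.strip()
--             and not line.strip().startswith('INFO:')
--             and not line.strip().startswith('WARNING:')
--             and not line.strip().startswith('input_prompt:')
--         ]
--         return '\n'.join(filtered).strip()
--
--     return '\n'.join(response_lines).strip()
-- ===== SOURCE B (Python) =====
-- def extract_main_output_text(raw_output: str) -> str:
--     # One reverse pass, building back-to-front: no boolean flag, no marker index.
--     pre_benchmark = raw_output.split('BenchmarkInfo:', 1)[0]
--     rev = []      # tail candidates, in reverse order
--     fb = []       # fallback candidates, in reverse order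
--     k = None      # len(rev) when the first marker (last seen in reverse) was met
--     for line in reversed(pre_benchmark.splitlines()):
--         line = line.rstrip()
--         s = line.strip()
--         if s.startswith('input_prompt:'):
--             k = len(rev)
--         else:
--             noisy = s.startswith('INFO:') or s.startswith('WARNING:')
--             if not noisy:
--                 rev.append(line)
--             if s and not noisy:
--                 fb.append(line)
--     tail = rev[:k][::-1] if k is not None else []
--     out = tail if tail else fb[::-1]
--     return '\n'.join(out).strip()
-- ===== Notes on version B (the rewrite author's own statement) =====
-- stated objective: alternative
-- what changed: Replaces A's forward scan with a stateful boolean flag by a single reverse pass that builds both the tail and the fallback lists back-to-front, marking the first 'input_prompt:' line by a length snapshot and slicing the reversed accumulator.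
import Mathlib
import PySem

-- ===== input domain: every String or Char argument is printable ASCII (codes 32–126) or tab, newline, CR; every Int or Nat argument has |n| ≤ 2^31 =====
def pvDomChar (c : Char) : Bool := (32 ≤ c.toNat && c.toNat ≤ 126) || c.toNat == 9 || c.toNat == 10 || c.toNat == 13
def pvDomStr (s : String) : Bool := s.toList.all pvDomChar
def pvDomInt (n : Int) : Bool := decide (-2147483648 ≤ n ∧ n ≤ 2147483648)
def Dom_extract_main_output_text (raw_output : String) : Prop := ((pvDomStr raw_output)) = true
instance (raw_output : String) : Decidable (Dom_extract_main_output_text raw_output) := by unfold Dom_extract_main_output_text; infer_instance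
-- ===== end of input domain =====

-- B replaces A's forward flag-loop by one reverse pass that builds both candidate lists
-- back-to-front and marks the first 'input_prompt:' line with a length snapshot (objective: alternative).

-- ===== PORT A =====
-- A's loop body: state = (response_lines, saw_input_prompt)
def pvStepA (st : List String × Bool) (line : String) : List String × Bool :=
  let stripped := PySem.Str.strip line
  if PySem.Str.startswith stripped "input_prompt:" then (st.1, true)
  else if !st.2 then st
  else if PySem.Str.startswith stripped "INFO:" || PySem.Str.startswith stripped "WARNING:" then st
  else (st.1 ++ [line], st.2)

def extract_main_output_text (raw_output : String) : String :=
  let pre_benchmark := ((PySem.Str.splitMax? raw_output "BenchmarkInfo:" 1).getD []).headD ""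
  let lines := (PySem.Str.splitlines pre_benchmark).map PySem.Str.rstrip
  let response_lines := (lines.foldl pvStepA ([], false)).1
  if response_lines.isEmpty then
    let filtered := lines.filter (fun line =>
      (PySem.Str.strip line != "")
      && !PySem.Str.startswith (PySem.Str.strip line) "INFO:"
      && !PySem.Str.startswith (PySem.Str.strip line) "WARNING:"
      && !PySem.Str.startswith (PySem.Str.strip line) "input_prompt:")
    PySem.Str.strip (PySem.Str.join "\n" filtered)
  else
    PySem.Str.strip (PySem.Str.join "\n" response_lines)

-- ===== PORT B =====
-- B's loop body over reversed(pre.splitlines()): state = (rev, fb, k)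
def pvStepB (st : List String × List String × Option Nat) (line0 : String) :
    List String × List String × Option Nat :=
  let line := PySem.Str.rstrip line0
  let s := PySem.Str.strip line
  if PySem.Str.startswith s "input_prompt:" then (st.1, st.2.1, some st.1.length)
  else
    let noisy := PySem.Str.startswith s "INFO:" || PySem.Str.startswith s "WARNING:"
    let rev := if !noisy then st.1 ++ [line] else st.1
    let fb := if (s != "") && !noisy then st.2.1 ++ [line] else st.2.1
    (rev, fb, st.2.2)

def extract_main_output_text_alt (raw_output : String) : String :=
  let pre_benchmark := ((PySem.Str.splitMax? raw_output "BenchmarkInfo:" 1).getD []).headD ""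
  let st := ((PySem.Str.splitlines pre_benchmark).reverse).foldl pvStepB ([], [], none)
  let tail := match st.2.2 with
    | some k => (st.1.take k).reverse
    | none => []
  let out := if tail.isEmpty then st.2.1.reverse else tail
  PySem.Str.strip (PySem.Str.join "\n" out)

-- ===== PRECONDITION & SPEC =====
def Spec_extract_main_output_text (raw_output : String) (out : String) : Prop := out = extract_main_output_text_alt raw_output
instance (raw_output : String) (out : String) : Decidable (Spec_extract_main_output_text raw_output out) := by unfold Spec_extract_main_output_text; infer_instance

-- ===== CLAIM (what is proved, stated in full; the proofs are below) =====
def Claim_equal_extract_main_output_text : Prop := ∀ (raw_output : String), Dom_extract_main_output_text raw_output → Spec_extract_main_output_text raw_output (extract_main_output_text raw_output)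

-- ===== LEMMAS AND PROOFS =====
def pvMarker (l : String) : Bool := PySem.Str.startswith (PySem.Str.strip l) "input_prompt:"
def pvNoisy (l : String) : Bool :=
  PySem.Str.startswith (PySem.Str.strip l) "INFO:" || PySem.Str.startswith (PySem.Str.strip l) "WARNING:"
def pvKeep (l : String) : Bool := !pvMarker l && !pvNoisy l
def pvFbKeep (l : String) : Bool := !pvMarker l && ((PySem.Str.strip l != "") && !pvNoisy l)

-- Once the flag is true, A's loop appends exactly the pvKeep lines.
theorem pvFoldA_true (lines : List String) (acc : List String) :
    lines.foldl pvStepA (acc, true) = (acc ++ lines.filter pvKeep, true) := by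
  induction lines generalizing acc with
  | nil => simp
  | cons l t ih =>
    by_cases hm : pvMarker l = true
    · have hk : pvKeep l = false := by simp [pvKeep, hm]
      simp [pvMarker] at hm
      simp [pvStepA, hm, ih, hk]
    · simp [pvMarker] at hm
      by_cases hl : pvNoisy l = true
      · have hk : pvKeep l = false := by simp [pvKeep, hl]
        simp [pvNoisy] at hl
        rcases hl with h | h
        · simp [pvStepA, hm, h, ih, hk]
        · simp [pvStepA, hm, h, ih, hk]
      · have hk : pvKeep l = true := by simp [pvKeep, pvMarker, hm, hl]
        simp [pvNoisy] at hl
        simp [pvStepA, hm, hl.1, hl.2, ih, hk]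

-- From flag false, A's loop result is filter after the first marker.
theorem pvFoldA_false (lines : List String) (acc : List String) :
    lines.foldl pvStepA (acc, false) =
      match lines.findIdx? pvMarker with
      | some i => (acc ++ (lines.drop (i + 1)).filter pvKeep, true)
      | none => (acc, false) := by
  induction lines generalizing acc with
  | nil => simp
  | cons l t ih =>
    by_cases hm : pvMarker l = true
    · have hm' := hm
      simp [pvMarker] at hm'
      simp [pvStepA, hm', List.findIdx?_cons, hm, pvFoldA_true]
    · have hm' := hm
      simp [pvMarker] at hm'
      simp only [List.foldl_cons, List.findIdx?_cons, hm]
      have hstep : pvStepA (acc, false) l = (acc, false) := by simp [pvStepA, hm']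
      rw [hstep, ih]
      cases h : t.findIdx? pvMarker with
      | none => simp
      | some i => simp

-- B's step on an already-rstripped line (pvStepB with the inner rstrip factored out).
def pvStepB' (st : List String × List String × Option Nat) (line : String) :
    List String × List String × Option Nat :=
  if pvMarker line then (st.1, st.2.1, some st.1.length)
  else
    ( if !pvNoisy line then st.1 ++ [line] else st.1,
      if (PySem.Str.strip line != "") && !pvNoisy line then st.2.1 ++ [line] else st.2.1,
      st.2.2 )

theorem pvStepB_eq (st : List String × List String × Option Nat) (l : String) :
    pvStepB st l = pvStepB' st (PySem.Str.rstrip l) := by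
  simp [pvStepB, pvStepB', pvMarker, pvNoisy]

-- Characterisation of B's reverse fold.
theorem pvFoldB (xs : List String) :
    xs.reverse.foldl pvStepB' ([], [], none) =
      ( (xs.filter pvKeep).reverse,
        (xs.filter pvFbKeep).reverse,
        (xs.findIdx? pvMarker).map (fun i => ((xs.drop (i + 1)).filter pvKeep).length) ) := by
  induction xs with
  | nil => simp
  | cons l t ih =>
    simp only [List.reverse_cons, List.foldl_append, List.foldl_cons, List.foldl_nil, ih]
    by_cases hm : pvMarker l = true
    · have hk : pvKeep l = false := by simp [pvKeep, hm]
      have hf : pvFbKeep l = false := by simp [pvFbKeep, hm]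
      simp [pvStepB', hm, hk, hf, List.findIdx?_cons]
    · have hmf : pvMarker l = false := by simp at hm; exact hm
      have hkeq : pvKeep l = !pvNoisy l := by simp [pvKeep, hmf]
      have hfeq : pvFbKeep l = ((PySem.Str.strip l != "") && !pvNoisy l) := by simp [pvFbKeep, hmf]
      simp only [pvStepB', hmf, Bool.false_eq_true, if_false, List.findIdx?_cons, List.filter_cons,
        hkeq, hfeq, List.drop_succ_cons]
      cases h : t.findIdx? pvMarker <;>
        cases hn : pvNoisy l <;>
          by_cases hs : (PySem.Str.strip l != "") = true <;>
            simp_all [List.reverse_cons]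

-- take (length of the after-marker keeps) of the reversed keep list is the after-marker keeps, reversed.
theorem pvTake_rev' (a b : List String) :
    (((a ++ b).filter pvKeep).reverse.take ((b.filter pvKeep)).length).reverse = b.filter pvKeep := by
  rw [List.filter_append, List.reverse_append,
    show (b.filter pvKeep).length = (b.filter pvKeep).reverse.length by simp,
    List.take_left, List.reverse_reverse]

theorem pvTake_rev (xs : List String) (i : Nat) :
    ((xs.filter pvKeep).reverse.take ((xs.drop (i + 1)).filter pvKeep).length).reverse
      = (xs.drop (i + 1)).filter pvKeep := by
  have h := pvTake_rev' (xs.take (i + 1)) (xs.drop (i + 1))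
  rwa [List.take_append_drop] at h

-- A's fallback predicate is pvFbKeep.
theorem pvFb_pred (l : String) :
    ((PySem.Str.strip l != "")
      && !PySem.Str.startswith (PySem.Str.strip l) "INFO:"
      && !PySem.Str.startswith (PySem.Str.strip l) "WARNING:"
      && !PySem.Str.startswith (PySem.Str.strip l) "input_prompt:") = pvFbKeep l := by
  simp only [pvFbKeep, pvMarker, pvNoisy]
  cases PySem.Str.startswith (PySem.Str.strip l) "input_prompt:" <;>
    cases PySem.Str.startswith (PySem.Str.strip l) "INFO:" <;>
      cases PySem.Str.startswith (PySem.Str.strip l) "WARNING:" <;>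
        cases (PySem.Str.strip l != "") <;> rfl

-- ===== VERDICT (by name: the statement is the Claim_ definition above) =====
theorem extract_main_output_text_spec : Claim_equal_extract_main_output_text := by
  intro raw_output _
  show _ = _
  unfold extract_main_output_text extract_main_output_text_alt
  have hmapfold : ∀ (ys : List String),
      ys.reverse.foldl pvStepB ([], [], none)
        = (ys.map PySem.Str.rstrip).reverse.foldl pvStepB' ([], [], none) := by
    intro ys
    have hstep : pvStepB = fun st l => pvStepB' st (PySem.Str.rstrip l) := by
      funext st l; exact pvStepB_eq st l
    rw [hstep, ← List.foldl_map, List.map_reverse]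
  set lines := (PySem.Str.splitlines (((PySem.Str.splitMax? raw_output "BenchmarkInfo:" 1).getD []).headD "")).map PySem.Str.rstrip with hlines
  simp only [← hlines, hmapfold, pvFoldB, pvFoldA_false]
  have hfb : lines.filter (fun line =>
      (PySem.Str.strip line != "")
      && !PySem.Str.startswith (PySem.Str.strip line) "INFO:"
      && !PySem.Str.startswith (PySem.Str.strip line) "WARNING:"
      && !PySem.Str.startswith (PySem.Str.strip line) "input_prompt:") = lines.filter pvFbKeep := by
    exact List.filter_congr (fun l _ => pvFb_pred l)
  cases h : lines.findIdx? pvMarker with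
  | none =>
    simp only [Option.map_none, List.isEmpty_nil, if_true, List.reverse_reverse]
    rw [hfb]
  | some i =>
    simp only [List.nil_append, Option.map_some, List.reverse_reverse]
    rw [pvTake_rev, hfb]
    split <;> rfl
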